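-- pv_equiv track=rewrite | github.com/harveyj/aoc | 2021/main.py | find_legal_x_for_y
-- ===== SOURCE A (Python) =====
-- def find_legal_x_for_y(base_x_1, base_x_2, base_y_1, base_y_2, v_y_0, t):
--   for v_x_0 in range(1500):
--     if v_x_0 > t:
--       x_d = v_x_0 - t
--       x = v_x_0 *(v_x_0+1) // 2 - x_d * (x_d + 1) //2
--     else:
--       x = v_x_0 *(v_x_0+1) // 2
--     if base_x_1 <= x <= base_x_2:
--       yield v_x_0, v_y_0
-- ===== SOURCE B (Python) =====
-- def find_legal_x_for_y(base_x_1, base_x_2, base_y_1, base_y_2, v_y_0, t):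
--   for v_x_0 in range(1500):
--     pos, v = 0, v_x_0
--     for _ in range(min(t, v_x_0)):
--       pos += v
--       v -= 1
--     if base_x_1 <= pos <= base_x_2:
--       yield v_x_0, v_y_0
-- ===== Notes on version B (the rewrite author's own statement) =====
-- stated objective: alternative
-- what changed: Replaces A's closed-form triangular-number formula for the x-position after t steps with an explicit step-by-step simulation of position and decaying velocity; Pre_ restricts to the natural domain t >= 0 (t is a step count; on negative t A's formula extrapolates backwards while a simulation takes no steps).
-- outside the precondition, e.g. on find_legal_x_for_y(-10, -1, 0, 0, 1, -2): A returns [(0, 1), (1, 1), (2, 1), (3, 1)], B returns []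
import Mathlib
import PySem

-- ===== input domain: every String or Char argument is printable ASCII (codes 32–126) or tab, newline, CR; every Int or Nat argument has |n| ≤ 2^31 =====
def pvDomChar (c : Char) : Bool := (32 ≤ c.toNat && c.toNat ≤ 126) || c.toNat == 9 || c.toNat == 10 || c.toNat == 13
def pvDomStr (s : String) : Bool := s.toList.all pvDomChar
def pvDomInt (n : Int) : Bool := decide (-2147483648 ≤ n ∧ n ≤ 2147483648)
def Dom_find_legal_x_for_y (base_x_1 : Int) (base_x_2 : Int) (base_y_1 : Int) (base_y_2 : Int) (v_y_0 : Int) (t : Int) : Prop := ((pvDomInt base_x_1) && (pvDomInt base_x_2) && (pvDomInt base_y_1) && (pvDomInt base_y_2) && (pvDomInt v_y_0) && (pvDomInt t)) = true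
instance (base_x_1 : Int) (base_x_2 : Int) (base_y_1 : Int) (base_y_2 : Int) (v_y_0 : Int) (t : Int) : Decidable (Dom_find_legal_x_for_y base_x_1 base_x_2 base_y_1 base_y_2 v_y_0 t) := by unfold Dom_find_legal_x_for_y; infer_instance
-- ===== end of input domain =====

-- ===== PORT A =====
-- B differs in one honest respect: A's x after t steps is a closed-form triangular formula;
-- B simulates the probe step by step. Return-value equivalence only (both are generators in Python).
def find_legal_x_for_y (base_x_1 : Int) (base_x_2 : Int) (base_y_1 : Int) (base_y_2 : Int) (v_y_0 : Int) (t : Int) : List (Int × Int) :=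
  (List.range 1500).foldl (fun acc v0 =>
    let vx : Int := (v0 : Int)
    let x : Int :=
      if vx > t then
        let x_d := vx - t
        PySem.Int.floordiv (vx * (vx + 1)) 2 - PySem.Int.floordiv (x_d * (x_d + 1)) 2
      else
        PySem.Int.floordiv (vx * (vx + 1)) 2
    if base_x_1 ≤ x ∧ x ≤ base_x_2 then acc ++ [(vx, v_y_0)] else acc) []

-- ===== PORT B =====
-- step simulation: pos += v; v -= 1, run for min(t, v0) steps
def simX : Int → Int → Nat → Int
  | pos, _, 0 => pos
  | pos, v, Nat.succ n => simX (pos + v) (v - 1) n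

def find_legal_x_for_y_alt (base_x_1 : Int) (base_x_2 : Int) (base_y_1 : Int) (base_y_2 : Int) (v_y_0 : Int) (t : Int) : List (Int × Int) :=
  (List.range 1500).foldl (fun acc v0 =>
    let pos := simX 0 (v0 : Int) (min t (v0 : Int)).toNat
    if base_x_1 ≤ pos ∧ pos ≤ base_x_2 then acc ++ [((v0 : Int), v_y_0)] else acc) []

-- ===== PRECONDITION & SPEC =====
-- Pre_ restricts to the natural domain t >= 0: t is a number of time steps, and on negative t
-- A's closed form extrapolates backwards in time while a step simulation takes no steps.
def Pre_find_legal_x_for_y (base_x_1 : Int) (base_x_2 : Int) (base_y_1 : Int) (base_y_2 : Int) (v_y_0 : Int) (t : Int) : Prop := 0 ≤ t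
instance (base_x_1 : Int) (base_x_2 : Int) (base_y_1 : Int) (base_y_2 : Int) (v_y_0 : Int) (t : Int) : Decidable (Pre_find_legal_x_for_y base_x_1 base_x_2 base_y_1 base_y_2 v_y_0 t) := by unfold Pre_find_legal_x_for_y; infer_instance
def pvWitness_find_legal_x_for_y : Int × Int × Int × Int × Int × Int := (0, 100, 0, 0, 7, 3)
def Spec_find_legal_x_for_y (base_x_1 : Int) (base_x_2 : Int) (base_y_1 : Int) (base_y_2 : Int) (v_y_0 : Int) (t : Int) (out : List (Int × Int)) : Prop := out = find_legal_x_for_y_alt base_x_1 base_x_2 base_y_1 base_y_2 v_y_0 t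
instance (base_x_1 : Int) (base_x_2 : Int) (base_y_1 : Int) (base_y_2 : Int) (v_y_0 : Int) (t : Int) (out : List (Int × Int)) : Decidable (Spec_find_legal_x_for_y base_x_1 base_x_2 base_y_1 base_y_2 v_y_0 t out) := by unfold Spec_find_legal_x_for_y; infer_instance

-- ===== CLAIM (what is proved, stated in full; the proofs are below) =====
def Claim_equal_find_legal_x_for_y : Prop := ∀ (base_x_1 : Int) (base_x_2 : Int) (base_y_1 : Int) (base_y_2 : Int) (v_y_0 : Int) (t : Int), Dom_find_legal_x_for_y base_x_1 base_x_2 base_y_1 base_y_2 v_y_0 t → Pre_find_legal_x_for_y base_x_1 base_x_2 base_y_1 base_y_2 v_y_0 t → Spec_find_legal_x_for_y base_x_1 base_x_2 base_y_1 base_y_2 v_y_0 t (find_legal_x_for_y base_x_1 base_x_2 base_y_1 base_y_2 v_y_0 t)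

-- ===== LEMMAS AND PROOFS =====
theorem two_mul_simX (n : Nat) (p v : Int) :
    2 * simX p v n = 2 * p + v * (v + 1) - (v - n) * (v - n + 1) := by
  induction n generalizing p v with
  | zero => simp [simX]
  | succ k ih => simp only [simX, ih]; push_cast; ring

theorem floordiv_even_mul_succ (x : Int) :
    2 * PySem.Int.floordiv (x * (x + 1)) 2 = x * (x + 1) := by
  have h := PySem.Int.floordiv_mul_add_mod (x * (x + 1)) 2
  have hm : PySem.Int.mod (x * (x + 1)) 2 = 0 := by
    rw [PySem.Int.mod_eq_zero_iff_dvd]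
    exact (Int.even_mul_succ_self x).two_dvd
  omega

theorem x_eq (v t : Int) (hv : 0 ≤ v) (ht : 0 ≤ t) :
    (if v > t then
        PySem.Int.floordiv (v * (v + 1)) 2 - PySem.Int.floordiv ((v - t) * ((v - t) + 1)) 2
      else PySem.Int.floordiv (v * (v + 1)) 2)
      = simX 0 v (min t v).toNat := by
  have h1 := floordiv_even_mul_succ v
  have h2 := floordiv_even_mul_succ (v - t)
  split_ifs with h
  · have hmin : min t v = t := by omega
    have hsim := two_mul_simX t.toNat 0 v
    rw [Int.toNat_of_nonneg ht] at hsim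
    rw [hmin]; omega
  · have hmin : min t v = v := by omega
    have hsim := two_mul_simX v.toNat 0 v
    rw [Int.toNat_of_nonneg hv] at hsim
    have hz : (v - v) * (v - v + 1) = (0:Int) := by ring
    rw [hmin]; omega

theorem find_legal_x_for_y_spec : Claim_equal_find_legal_x_for_y := by
  intro b1 b2 _ _ vy t _ ht
  show _ = _
  unfold find_legal_x_for_y find_legal_x_for_y_alt
  apply PySem.List.foldl_congr_mem
  intro acc v0 hv0
  have h0 : (0:Int) ≤ v0 := by
    simp [List.mem_range] at hv0
    obtain ⟨a, -, rfl⟩ := hv0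
    exact Int.natCast_nonneg a
  simp only
  rw [x_eq v0 t h0 ht]
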